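-- pv_equiv track=rewrite | github.com/luisgarciadelmolino/ICPipeline | utils/linguistic_features.py | count
-- ===== SOURCE A (Python) =====
-- def count(words):
--     """ Count the number of times that the word has occurred previously in the experiment
--     """
--
--     values = []
--
--     # dictionary whose keys are words and values number of occurrences
--     D = {}
--
--     for word in words:
--         # if word is already in dict add 1 to the count
--         try : D[word] +=1
--         # otherwise add entrye to dict
--         except :  D[word] = 1
--
--         values += [D[word]]
--
--     return values
-- ===== SOURCE B (Python) =====
-- def count(words):
--     """ Count the number of times that the word has occurred previously in the experiment
--     """
--     out = [0] * len(words)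
--     for w in dict.fromkeys(words):      # each distinct word, in first-occurrence order
--         rank = 0
--         for i, x in enumerate(words):
--             if x == w:
--                 rank += 1
--                 out[i] = rank
--     return out
-- ===== Notes on version B (the rewrite author's own statement) =====
-- stated objective: alternative
-- what changed: Replaces the single stateful pass with a running dictionary by a group-and-stamp scheme: preallocate the output array, then for each distinct word make a dedicated pass over the list stamping that word's occurrence ranks (1,2,...) into the positions where it occurs.
import Mathlib
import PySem

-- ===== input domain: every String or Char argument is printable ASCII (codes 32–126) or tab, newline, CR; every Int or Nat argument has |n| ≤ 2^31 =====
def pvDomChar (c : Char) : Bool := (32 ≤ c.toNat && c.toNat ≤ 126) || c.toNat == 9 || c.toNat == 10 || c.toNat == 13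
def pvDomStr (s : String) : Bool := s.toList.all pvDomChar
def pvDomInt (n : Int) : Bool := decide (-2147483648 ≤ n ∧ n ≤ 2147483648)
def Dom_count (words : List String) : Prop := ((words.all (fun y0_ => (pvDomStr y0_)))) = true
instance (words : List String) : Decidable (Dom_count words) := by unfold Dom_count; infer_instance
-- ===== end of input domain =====

-- B replaces A's single running-dictionary pass by a group-and-stamp scheme: a preallocated
-- output array plus one stamping pass per distinct word (alternative decomposition, not faster).

-- ===== PORT A =====
def count (words : List String) : List Int :=
  (words.foldl (fun (st : List Int × PySem.Dict String Int) word =>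
      let d := st.2.insert word (st.2.getD word 0 + 1)   -- try D[word]+=1 / except D[word]=1
      (st.1 ++ [d.getD word 0], d))                       -- values += [D[word]]
    ([], PySem.Dict.empty)).1

-- ===== PORT B =====
-- inner loop: 'rank = 0; for i, x in enumerate(words): if x == w: rank += 1; out[i] = rank'
def stampWord (words : List String) (w : String) (out : List Int) : List Int :=
  ((PySem.List.enumerate words 0).foldl
    (fun (st : Int × List Int) p =>
      if p.2 == w then (st.1 + 1, PySem.List.pySetD st.2 p.1 (st.1 + 1)) else st)
    (0, out)).2

def count_alt (words : List String) : List Int :=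
  (PySem.List.dedup words).foldl                          -- for w in dict.fromkeys(words)
    (fun out w => stampWord words w out)
    (List.replicate words.length 0)                       -- out = [0] * len(words)

-- ===== PRECONDITION & SPEC =====
def Spec_count (words : List String) (out : List Int) : Prop := out = count_alt words
instance (words : List String) (out : List Int) : Decidable (Spec_count words out) := by unfold Spec_count; infer_instance

-- ===== CLAIM (what is proved, stated in full; the proofs are below) =====
def Claim_equal_count : Prop := ∀ (words : List String), Dom_count words → Spec_count words (count words)

-- ===== LEMMAS AND PROOFS =====

-- the common characterisation: position i carries the count of words[i] in the inclusive prefix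
def specList (ws : List String) : List Int :=
  (List.range ws.length).map (fun i => ((ws.take (i + 1)).count (ws.getD i "") : Int))

-- ---- A side ----
lemma count_foldl_snd (ws : List String) (vals : List Int) (d : PySem.Dict String Int) :
    (ws.foldl (fun (st : List Int × PySem.Dict String Int) word =>
        (st.1 ++ [st.2.getD word 0 + 1], st.2.insert word (st.2.getD word 0 + 1))) (vals, d)).2
      = ws.foldl (fun d x => d.insert x (d.getD x 0 + 1)) d := by
  induction ws generalizing vals d with
  | nil => rfl
  | cons x xs ih => simp only [List.foldl_cons]; exact ih _ _

lemma count_snoc (ws : List String) (w : String) :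
    count (ws ++ [w]) = count ws ++ [(ws.count w : Int) + 1] := by
  unfold count
  rw [List.foldl_append]
  simp only [List.foldl_cons, List.foldl_nil, PySem.Dict.getD_insert_self]
  rw [count_foldl_snd, PySem.Dict.foldl_insert_getD_add_one_eq_counter,
    PySem.Dict.getD_counter]

lemma specList_snoc (ws : List String) (w : String) :
    specList (ws ++ [w]) = specList ws ++ [(ws.count w : Int) + 1] := by
  unfold specList
  rw [List.length_append, List.length_singleton, List.range_succ, List.map_append]
  congr 1
  · apply List.map_congr_left
    intro i hi
    rw [List.mem_range] at hi
    rw [List.take_append_of_le_length (by omega), List.getD, List.getD,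
      List.getElem?_append_left hi]
  · simp only [List.map_cons, List.map_nil, List.cons.injEq, and_true]
    rw [List.take_of_length_le (by simp), List.getD,
      List.getElem?_append_right (le_refl _)]
    simp [List.count_append]

lemma count_eq_specList (ws : List String) : count ws = specList ws := by
  induction ws using List.reverseRecOn with
  | nil => rfl
  | append_singleton ws w ih => rw [count_snoc, specList_snoc, ih]

-- ---- B side ----
lemma stamp_spec (w : String) (out : List Int) (ws : List String)
    (hle : ws.length ≤ out.length) :
    let res := ((PySem.List.enumerate ws 0).foldl
      (fun (st : Int × List Int) p =>
        if p.2 == w then (st.1 + 1, PySem.List.pySetD st.2 p.1 (st.1 + 1)) else st)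
      (0, out))
    res.1 = (ws.count w : Int) ∧ res.2.length = out.length ∧
      ∀ i : Nat, res.2[i]? =
        if ws[i]? = some w then some (((ws.take (i + 1)).count w : Int)) else out[i]? := by
  induction ws using List.reverseRecOn with
  | nil =>
      refine ⟨by simp, by simp, fun i => ?_⟩
      simp
  | append_singleton ws x ih =>
      have hle' : ws.length ≤ out.length := by simp at hle; omega
      obtain ⟨h1, h2, h3⟩ := ih hle'
      rw [PySem.List.enumerate_append]
      simp only [List.foldl_append]
      have e1 : PySem.List.enumerate [x] ((0 : Int) + ws.length) = [(((0 : Int) + ws.length), x)] := by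
        simp [PySem.List.enumerate]
      rw [e1]
      simp only [List.foldl_cons, List.foldl_nil]
      set r := ((PySem.List.enumerate ws 0).foldl
        (fun (st : Int × List Int) p =>
          if p.2 == w then (st.1 + 1, PySem.List.pySetD st.2 p.1 (st.1 + 1)) else st)
        (0, out)) with hr
      have hlen : ws.length < out.length := by simp at hle; omega
      by_cases hw : x = w
      · subst hw
        simp only [beq_self_eq_true, if_true]
        have hset : PySem.List.pySetD r.2 ((0 : Int) + ws.length) (r.1 + 1)
            = r.2.set ws.length (r.1 + 1) := by simp
        refine ⟨?_, ?_, fun i => ?_⟩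
        · rw [h1]
          simp [List.count_append]
        · simp only [hset, List.length_set, h2]
        · simp only [hset]
          rcases eq_or_ne i ws.length with hi | hi
          · subst hi
            have hcond : (ws ++ [x])[ws.length]? = some x := by
              rw [List.getElem?_append_right (le_refl _)]; simp
            rw [List.getElem?_set_self (h2 ▸ hlen), if_pos hcond,
              List.take_of_length_le (by simp), h1]
            simp [List.count_append]
          · rw [List.getElem?_set_ne (Ne.symm hi), h3 i]
            rcases lt_or_ge i ws.length with hlt | hge
            · rw [List.getElem?_append_left hlt,
                List.take_append_of_le_length (by omega)]
            · have h₁ : ws[i]? = none := by simp; omega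
              have h₂ : (ws ++ [x])[i]? = none := by simp; omega
              simp [h₁, h₂]
      · have hbeq : (x == w) = false := by simp [hw]
        simp only [hbeq, Bool.false_eq_true, if_false]
        refine ⟨?_, h2, fun i => ?_⟩
        · rw [h1]; simp [List.count_append, hw]
        · rw [h3 i]
          rcases lt_or_ge i ws.length with hlt | hge
          · rw [List.getElem?_append_left hlt,
              List.take_append_of_le_length (by omega)]
          · have h₁ : ws[i]? = none := by simp; omega
            have h₂ : ∀ y, (ws ++ [x])[i]? = some y → y = x := by
              intro y hy
              rcases eq_or_ne i ws.length with hi | hi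
              · subst hi
                rw [List.getElem?_append_right (le_refl _)] at hy
                simpa using hy.symm
              · rw [List.getElem?_eq_none (by simp; omega)] at hy; cases hy
            rcases hx2 : (ws ++ [x])[i]? with _ | y
            · simp [h₁]
            · have := h₂ y hx2
              subst this
              simp [h₁, hw]

lemma stamps_spec (words : List String) (ds : List String) : ∀ (out : List Int),
    words.length ≤ out.length →
    (ds.foldl (fun o w => stampWord words w o) out).length = out.length ∧
    ∀ i : Nat, (ds.foldl (fun o w => stampWord words w o) out)[i]? =
      match words[i]? with
      | some x => if x ∈ ds then some (((words.take (i + 1)).count x : Int)) else out[i]?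
      | none => out[i]? := by
  induction ds with
  | nil =>
      intro out _
      refine ⟨rfl, fun i => ?_⟩
      rcases words[i]? with _ | x <;> simp
  | cons d ds ih =>
      intro out hle
      obtain ⟨s1, s2, s3⟩ := stamp_spec d out words hle
      simp only [List.foldl_cons]
      have hle' : words.length ≤ (stampWord words d out).length := by
        unfold stampWord; rw [s2]; exact hle
      obtain ⟨l1, l2⟩ := ih (stampWord words d out) hle'
      refine ⟨by rw [l1]; unfold stampWord; exact s2, fun i => ?_⟩
      rw [l2 i]
      have hout : (stampWord words d out)[i]? =
          if words[i]? = some d then some (((words.take (i + 1)).count d : Int))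
          else out[i]? := s3 i
      rcases hwi : words[i]? with _ | x
      · simp only [hout, hwi]
        simp
      · simp only [hout, hwi]
        by_cases hds : x ∈ ds
        · simp [hds]
        · simp only [hds, if_false]
          by_cases hxd : x = d
          · subst hxd
            simp [hds]
          · have : ¬ (some x = some d) := by simp [hxd]
            simp [hds, hxd, this]

lemma alt_eq_specList (ws : List String) : count_alt ws = specList ws := by
  obtain ⟨l1, l2⟩ := stamps_spec ws (PySem.List.dedup ws) (List.replicate ws.length 0)
    (by simp)
  unfold count_alt
  apply List.ext_getElem?
  intro i
  rw [l2 i]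
  rcases lt_or_ge i ws.length with hlt | hge
  · have hwi : ws[i]? = some ws[i] := List.getElem?_eq_getElem hlt
    have hmem : ws[i] ∈ PySem.List.dedup ws := by
      rw [PySem.List.mem_dedup]; exact List.getElem_mem hlt
    simp only [hwi, hmem, if_true]
    unfold specList
    rw [List.getElem?_map, List.getElem?_range hlt]
    simp [List.getD, hwi]
  · have hwi : ws[i]? = none := List.getElem?_eq_none (by omega)
    have h₂ : (List.replicate ws.length (0 : Int))[i]? = none :=
      List.getElem?_eq_none (by simpa using hge)
    have h₃ : (specList ws)[i]? = none :=
      List.getElem?_eq_none (by unfold specList; simpa using hge)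
    simp only [hwi, h₂, h₃]

-- ===== VERDICT (by name: the statement is the Claim_ definition above) =====
theorem count_spec : Claim_equal_count := by
  intro words _
  unfold Spec_count
  rw [count_eq_specList, alt_eq_specList]
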